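-- pv_equiv track=rewrite | github.com/neutronimaging/python_notebooks | notebooks/__code/combine_images_n_by_n/combine_images_n_by_n.py | files_shared_same_base_name
-- ===== SOURCE A (Python) =====
-- def files_shared_same_base_name(list_files):
--     list_base_file_name = []
--     for _file in list_files:
--         split_base_name = _file.split("_")
--         list_base_file_name.append("_".join(split_base_name[:-1]))
--
--     set_list = set(list_base_file_name)
--     if len(set_list) > 1:
--         return False
--
--     return True
-- ===== SOURCE B (Python) =====
-- def files_shared_same_base_name(list_files):
--     if not list_files:
--         return True
--     ref = "_".join(list_files[0].split("_")[:-1])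
--     return all("_".join(f.split("_")[:-1]) == ref for f in list_files[1:])
-- ===== Notes on version B (the rewrite author's own statement) =====
-- stated objective: simpler
-- what changed: Replaces the accumulate-all-base-names-then-set-cardinality check with a short-circuiting comparison of each remaining file's base name against the first file's, building no intermediate list or set.
import Mathlib
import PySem

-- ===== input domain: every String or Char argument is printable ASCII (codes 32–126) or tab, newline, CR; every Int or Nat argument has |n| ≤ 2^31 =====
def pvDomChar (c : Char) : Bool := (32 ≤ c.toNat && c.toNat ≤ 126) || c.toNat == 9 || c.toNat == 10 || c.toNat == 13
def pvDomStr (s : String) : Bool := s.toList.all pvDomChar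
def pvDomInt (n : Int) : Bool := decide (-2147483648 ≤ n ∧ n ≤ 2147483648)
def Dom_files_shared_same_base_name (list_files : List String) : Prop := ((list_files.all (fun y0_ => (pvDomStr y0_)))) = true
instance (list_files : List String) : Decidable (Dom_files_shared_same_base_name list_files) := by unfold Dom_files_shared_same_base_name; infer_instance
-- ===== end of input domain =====

-- B replaces the list+set cardinality check with a short-circuiting comparison of each
-- base name against the first file's (objective: simpler).

-- the shared base-name transform: "_".join(f.split("_")[:-1])
def pvBase (f : String) : String :=
  PySem.Str.join "_" (PySem.List.slice (((PySem.Str.split? f "_").getD [])) none (some (-1)))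

-- ===== PORT A =====
def files_shared_same_base_name (list_files : List String) : Bool :=
  let list_base_file_name :=
    list_files.foldl (fun acc _file => acc ++ [pvBase _file]) []
  let set_list := PySem.Set.ofList list_base_file_name
  if PySem.Set.len set_list > 1 then false else true

-- ===== PORT B =====
def files_shared_same_base_name_alt (list_files : List String) : Bool :=
  match list_files with
  | [] => true
  | first :: rest =>
    let ref := pvBase first
    rest.all (fun f => pvBase f == ref)

-- ===== PRECONDITION & SPEC =====
def Spec_files_shared_same_base_name (list_files : List String) (out : Bool) : Prop := out = files_shared_same_base_name_alt list_files
instance (list_files : List String) (out : Bool) : Decidable (Spec_files_shared_same_base_name list_files out) := by unfold Spec_files_shared_same_base_name; infer_instance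

-- ===== CLAIM (what is proved, stated in full; the proofs are below) =====
def Claim_equal_files_shared_same_base_name : Prop := ∀ (list_files : List String), Dom_files_shared_same_base_name list_files → Spec_files_shared_same_base_name list_files (files_shared_same_base_name list_files)

-- ===== LEMMAS AND PROOFS =====

-- ===== VERDICT (by name: the statement is the Claim_ definition above) =====
lemma pvFoldl_append_eq_map (xs : List String) (acc : List String) :
    xs.foldl (fun acc f => acc ++ [pvBase f]) acc = acc ++ xs.map pvBase := by
  induction xs generalizing acc with
  | nil => simp
  | cons x xs ih => simp [List.foldl, ih]

lemma pvSetLen_le_one_iff (b : String) (bs : List String) :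
    ¬ PySem.Set.len (PySem.Set.ofList (b :: bs)) > 1 ↔ ∀ x ∈ bs, x = b := by
  have hnd := PySem.Set.nodup_ofList (b :: bs)
  have hb : b ∈ PySem.Set.ofList (b :: bs) := (PySem.Set.mem_ofList _ _).mpr (by simp)
  constructor
  · intro hle x hx
    have hx' : x ∈ PySem.Set.ofList (b :: bs) :=
      (PySem.Set.mem_ofList _ _).mpr (by simp [hx])
    have hlen : (PySem.Set.ofList (b :: bs)).length ≤ 1 := by
      simp only [PySem.Set.len] at hle; omega
    match hs : PySem.Set.ofList (b :: bs), hlen with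
    | [y], _ =>
      rw [hs] at hb hx'
      simp only [List.mem_singleton] at hb hx'
      rw [hx', hb]
    | [], _ => rw [hs] at hb; simp at hb
  · intro hall
    have hmem : ∀ x ∈ PySem.Set.ofList (b :: bs), x = b := by
      intro x hx
      rcases List.mem_cons.mp ((PySem.Set.mem_ofList _ _).mp hx) with h | h
      · exact h
      · exact hall _ h
    simp only [PySem.Set.len]
    match hs : PySem.Set.ofList (b :: bs), hnd, hmem with
    | [], _, _ => simp
    | [y], _, _ => simp
    | y :: z :: t, hnd', hmem' => 
      exfalso
      have hy : y = b := hmem' y (by simp)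
      have hz : z = b := hmem' z (by simp)
      simp [hy, hz] at hnd'

theorem files_shared_same_base_name_spec : Claim_equal_files_shared_same_base_name := by
  intro list_files _
  unfold Spec_files_shared_same_base_name
  cases list_files with
  | nil => decide
  | cons first rest =>
    simp only [files_shared_same_base_name, files_shared_same_base_name_alt,
      pvFoldl_append_eq_map, List.nil_append, List.map_cons]
    by_cases hall : ∀ x ∈ rest.map pvBase, x = pvBase first
    · rw [if_neg ((pvSetLen_le_one_iff _ _).mpr hall)]
      symm
      simp only [List.all_eq_true, beq_iff_eq]
      exact fun f hf => hall _ (List.mem_map_of_mem hf)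
    · rw [if_pos (by_contra fun h => hall ((pvSetLen_le_one_iff _ _).mp h))]
      symm
      simp only [List.all_eq_false]
      push Not at hall
      obtain ⟨x, hx, hne⟩ := hall
      obtain ⟨f, hf, rfl⟩ := List.mem_map.mp hx
      exact ⟨f, hf, by simpa using hne⟩
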